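-- pv_equiv track=rewrite | github.com/pypi-data/pypi-mirror-381 | packages/mwe-query/mwe_query-0.2.0a2.tar.gz/mwe_query-0.2.0a2/mwe_query/getmwecomponents.py | getaltrelcondlist
-- ===== SOURCE A (Python) =====
-- from typing import List
--
-- Relation = str
--
-- def getdonerelscond(donerels: List[Relation]) -> str:
--     result = ' or '.join([f'@rel={donerel}' for donerel in donerels])
--     return result
--
-- def getaltrelcondlist(rel: Relation, altrels: List[Relation]) -> List[str]:
--     results = []
--     donerels = [rel]
--     for altrel in altrels:
--         donerelscond = getdonerelscond(donerels)
--         newcond = f'(not(node[{donerelscond}]) and node[@rel="{altrel}"])'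
--         results.append(newcond)
--         donerels.append(altrel)
--     return results
-- ===== SOURCE B (Python) =====
-- def getaltrelcondlist(rel, altrels):
--     # Single incremental pass: maintain the running disjunction instead of a
--     # donerels list re-joined on every iteration.
--     results = []
--     cond = f'@rel={rel}'
--     for altrel in altrels:
--         results.append(f'(not(node[{cond}]) and node[@rel="{altrel}"])')
--         cond += f' or @rel={altrel}'
--     return results
-- ===== Notes on version B (the rewrite author's own statement) =====
-- stated objective: simpler
-- what changed: Replaces the donerels accumulator list plus a per-iteration join over it (via the getdonerelscond helper) with one running condition string extended in place, turning the nested join pass into a single incremental pass and dropping the helper.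
import Mathlib
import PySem

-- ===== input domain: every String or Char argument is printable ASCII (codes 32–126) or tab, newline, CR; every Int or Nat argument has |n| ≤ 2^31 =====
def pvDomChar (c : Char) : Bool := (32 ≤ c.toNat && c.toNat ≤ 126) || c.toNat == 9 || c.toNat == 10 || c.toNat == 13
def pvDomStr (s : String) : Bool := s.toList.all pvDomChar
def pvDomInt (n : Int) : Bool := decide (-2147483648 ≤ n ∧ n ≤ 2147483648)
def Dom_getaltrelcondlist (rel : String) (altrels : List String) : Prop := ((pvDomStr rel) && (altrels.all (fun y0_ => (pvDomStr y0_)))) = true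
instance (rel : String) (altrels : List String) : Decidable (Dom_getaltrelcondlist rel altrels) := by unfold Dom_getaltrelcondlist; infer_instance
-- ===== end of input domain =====

-- B replaces the donerels list + per-iteration join with one running condition string (simpler single pass).


-- ===== PORT A =====
-- helper: ' or '.join([f'@rel={donerel}' for donerel in donerels])
def getdonerelscond (donerels : List String) : String :=
  PySem.Str.join " or " (donerels.map (fun donerel => "@rel=" ++ donerel))

-- loop over altrels carrying (results, donerels), as in A
def getaltrelcondlistLoopA (altrels : List String) (results : List String)
    (donerels : List String) : List String :=
  match altrels with
  | [] => results
  | altrel :: rest =>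
      let donerelscond := getdonerelscond donerels
      let newcond := "(not(node[" ++ donerelscond ++ "]) and node[@rel=\"" ++ altrel ++ "\"])"
      getaltrelcondlistLoopA rest (results ++ [newcond]) (donerels ++ [altrel])

def getaltrelcondlist (rel : String) (altrels : List String) : List String :=
  getaltrelcondlistLoopA altrels [] [rel]

-- ===== PORT B =====
-- loop over altrels carrying (results, cond), as in B
def getaltrelcondlistLoopB (altrels : List String) (results : List String)
    (cond : String) : List String :=
  match altrels with
  | [] => results
  | altrel :: rest =>
      getaltrelcondlistLoopB rest
        (results ++ ["(not(node[" ++ cond ++ "]) and node[@rel=\"" ++ altrel ++ "\"])"])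
        (cond ++ " or @rel=" ++ altrel)

def getaltrelcondlist_alt (rel : String) (altrels : List String) : List String :=
  getaltrelcondlistLoopB altrels [] ("@rel=" ++ rel)

-- ===== PRECONDITION & SPEC =====
def Spec_getaltrelcondlist (rel : String) (altrels : List String) (out : List String) : Prop := out = getaltrelcondlist_alt rel altrels
instance (rel : String) (altrels : List String) (out : List String) : Decidable (Spec_getaltrelcondlist rel altrels out) := by unfold Spec_getaltrelcondlist; infer_instance

-- ===== CLAIM (what is proved, stated in full; the proofs are below) =====
def Claim_equal_getaltrelcondlist : Prop := ∀ (rel : String) (altrels : List String), Dom_getaltrelcondlist rel altrels → Spec_getaltrelcondlist rel altrels (getaltrelcondlist rel altrels)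

-- ===== LEMMAS AND PROOFS =====

-- joining a nonempty list extended by one element appends ' sep ' and that element
theorem chars_join_snoc (sep p a : List Char) (l : List (List Char)) :
    PySem.Chars.join sep ((p :: l) ++ [a]) = PySem.Chars.join sep (p :: l) ++ sep ++ a := by
  induction l generalizing p with
  | nil => simp [PySem.Chars.join, List.intercalate]
  | cons q rest ih =>
      have h1 := PySem.Chars.join_cons_cons sep p q (rest ++ [a])
      have h2 := PySem.Chars.join_cons_cons sep p q rest
      calc PySem.Chars.join sep ((p :: q :: rest) ++ [a])
          = p ++ sep ++ PySem.Chars.join sep ((q :: rest) ++ [a]) := h1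
        _ = p ++ sep ++ (PySem.Chars.join sep (q :: rest) ++ sep ++ a) := by rw [ih]
        _ = PySem.Chars.join sep (p :: q :: rest) ++ sep ++ a := by rw [h2]; simp

theorem getdonerelscond_snoc (p a : String) (l : List String) :
    getdonerelscond ((p :: l) ++ [a]) = getdonerelscond (p :: l) ++ " or @rel=" ++ a := by
  apply String.toList_injective
  simp only [getdonerelscond, PySem.Str.toList_join, List.map_append, List.map_cons,
    String.toList_append]
  have := chars_join_snoc (" or ".toList) ("@rel=" ++ p).toList ("@rel=" ++ a).toList
    (l.map (fun d => ("@rel=" ++ d).toList))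
  simpa [Function.comp_def, String.toList_append] using this

theorem loopA_eq_loopB (altrels results : List String) (p : String) (l : List String) :
    getaltrelcondlistLoopA altrels results (p :: l) =
      getaltrelcondlistLoopB altrels results (getdonerelscond (p :: l)) := by
  induction altrels generalizing results p l with
  | nil => rfl
  | cons altrel rest ih =>
      simp only [getaltrelcondlistLoopA, getaltrelcondlistLoopB]
      rw [show (p :: l) ++ [altrel] = p :: (l ++ [altrel]) from rfl] at *
      have := ih (results ++ ["(not(node[" ++ getdonerelscond (p :: l) ++ "]) and node[@rel=\"" ++ altrel ++ "\"])"]) p (l ++ [altrel])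
      rw [show p :: (l ++ [altrel]) = (p :: l) ++ [altrel] from rfl, getdonerelscond_snoc] at this
      simpa using this

theorem getdonerelscond_singleton (rel : String) :
    getdonerelscond [rel] = "@rel=" ++ rel := by
  apply String.toList_injective
  simp [getdonerelscond, PySem.Str.toList_join, PySem.Chars.join, List.intercalate]

-- ===== VERDICT (by name: the statement is the Claim_ definition above) =====
theorem getaltrelcondlist_spec : Claim_equal_getaltrelcondlist := by
  intro rel altrels _
  unfold Spec_getaltrelcondlist getaltrelcondlist getaltrelcondlist_alt
  rw [loopA_eq_loopB, getdonerelscond_singleton]
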